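-- pv_equiv track=rewrite | github.com/Harsh4873/PickLedgerPro | NBAPredictionModel/probability_layers.py | _match_player_name
-- ===== SOURCE A (Python) =====
-- def _normalize_player_key(name: str) -> str:
--     return "".join(ch for ch in str(name or "").lower() if ch.isalnum())
--
-- def _match_player_name(player_name: str, candidate_names: list[str]) -> str | None:
--     target = _normalize_player_key(player_name)
--     if not target:
--         return None
--
--     normalized_candidates = []
--     for candidate in candidate_names:
--         normalized = _normalize_player_key(candidate)
--         if normalized:
--             normalized_candidates.append((normalized, candidate))
--
--     for normalized, candidate in normalized_candidates:
--         if normalized == target: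
--             return candidate
--
--     for normalized, candidate in normalized_candidates:
--         if target in normalized or normalized in target:
--             return candidate
--
--     return None
-- ===== SOURCE B (Python) =====
-- def _normalize_player_key(name: str) -> str:
--     return "".join(ch for ch in str(name or "").lower() if ch.isalnum())
--
-- def _match_player_name(player_name: str, candidate_names: list[str]) -> str | None:
--     target = _normalize_player_key(player_name)
--     if not target:
--         return None
--     fallback = None
--     for candidate in candidate_names:
--         normalized = _normalize_player_key(candidate)
--         if not normalized:
--             continue
--         if normalized == target:
--             return candidate
--         if fallback is None and (target in normalized or normalized in target):
--             fallback = candidate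
--     return fallback
-- ===== Notes on version B (the rewrite author's own statement) =====
-- stated objective: simpler
-- what changed: Replaces A's three passes (build a normalized-pairs list, scan it for an exact match, scan it again for a substring match) by a single pass over the candidates that returns immediately on an exact match and remembers only the first substring match as a fallback; no intermediate list is built.
import Mathlib
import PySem

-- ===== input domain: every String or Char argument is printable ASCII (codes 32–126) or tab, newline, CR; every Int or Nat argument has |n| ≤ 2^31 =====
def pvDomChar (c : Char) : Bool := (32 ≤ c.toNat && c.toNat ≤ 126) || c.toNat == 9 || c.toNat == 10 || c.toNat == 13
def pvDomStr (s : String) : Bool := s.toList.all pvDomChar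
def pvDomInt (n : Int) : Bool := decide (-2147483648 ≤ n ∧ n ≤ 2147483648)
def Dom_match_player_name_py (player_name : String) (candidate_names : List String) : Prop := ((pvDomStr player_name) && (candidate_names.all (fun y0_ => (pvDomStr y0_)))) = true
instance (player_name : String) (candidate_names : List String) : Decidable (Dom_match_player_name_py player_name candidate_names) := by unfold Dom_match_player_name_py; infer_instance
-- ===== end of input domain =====

-- B does A's job in one pass: return on the first exact normalized match, remember the
-- first substring match as a fallback — simpler (no intermediate list, no second scan).

-- ===== PORT A =====
-- _normalize_player_key: lowercase, keep alphanumeric chars ("".join over a genexp);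
-- ported on List Char (exact on the stated ASCII domain).
def pvNorm (l : List Char) : List Char :=
  (PySem.Chars.lower l).filter PySem.Chars.isalnum

def match_player_name_py (player_name : String) (candidate_names : List String) : Option String :=
  let target := pvNorm player_name.toList
  if target = [] then none
  else
    let normalized_candidates :=
      candidate_names.foldl
        (fun acc candidate =>
          let normalized := pvNorm candidate.toList
          if normalized = [] then acc else acc ++ [(normalized, candidate)]) []
    match normalized_candidates.find? (fun pr => pr.1 == target) with
    | some pr => some pr.2
    | none =>
      match normalized_candidates.find?
          (fun pr => PySem.Chars.isIn target pr.1 || PySem.Chars.isIn pr.1 target) with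
      | some pr => some pr.2
      | none => none

-- ===== PORT B =====
def pvLoop (target : List Char) (cs : List String) (fallback : Option String) : Option String :=
  match cs with
  | [] => fallback
  | candidate :: rest =>
    let normalized := pvNorm candidate.toList
    if normalized = [] then pvLoop target rest fallback
    else if normalized = target then some candidate
    else if fallback.isNone &&
        (PySem.Chars.isIn target normalized || PySem.Chars.isIn normalized target) then
      pvLoop target rest (some candidate)
    else pvLoop target rest fallback

def match_player_name_py_alt (player_name : String) (candidate_names : List String) : Option String :=
  let target := pvNorm player_name.toList
  if target = [] then none
  else pvLoop target candidate_names none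

-- ===== PRECONDITION & SPEC =====
def Spec_match_player_name_py (player_name : String) (candidate_names : List String) (out : Option String) : Prop := out = match_player_name_py_alt player_name candidate_names
instance (player_name : String) (candidate_names : List String) (out : Option String) : Decidable (Spec_match_player_name_py player_name candidate_names out) := by unfold Spec_match_player_name_py; infer_instance

-- ===== CLAIM (what is proved, stated in full; the proofs are below) =====
def Claim_equal_match_player_name_py : Prop := ∀ (player_name : String) (candidate_names : List String), Dom_match_player_name_py player_name candidate_names → Spec_match_player_name_py player_name candidate_names (match_player_name_py player_name candidate_names)

-- ===== LEMMAS AND PROOFS =====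

-- the normalized-pairs list A builds, as a filterMap
def pvPairs (cs : List String) : List (List Char × String) :=
  cs.filterMap (fun c =>
    let n := pvNorm c.toList
    if n = [] then none else some (n, c))

theorem pvBuild_eq (cs : List String) (acc : List (List Char × String)) :
    cs.foldl
      (fun acc candidate =>
        let normalized := pvNorm candidate.toList
        if normalized = [] then acc else acc ++ [(normalized, candidate)]) acc
    = acc ++ pvPairs cs := by
  induction cs generalizing acc with
  | nil => simp [pvPairs]
  | cons c rest ih =>
    simp only [List.foldl_cons, pvPairs, List.filterMap_cons]
    by_cases h : pvNorm c.toList = []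
    · simp [h, ih, pvPairs]
    · simp [h, ih, pvPairs]

theorem pvPairs_cons (c : String) (rest : List String) :
    pvPairs (c :: rest) =
      if pvNorm c.toList = [] then pvPairs rest
      else (pvNorm c.toList, c) :: pvPairs rest := by
  by_cases h : pvNorm c.toList = [] <;> simp [pvPairs, h]

theorem pvLoop_cons (t : List Char) (c : String) (rest : List String) (fb : Option String) :
    pvLoop t (c :: rest) fb =
      if pvNorm c.toList = [] then pvLoop t rest fb
      else if pvNorm c.toList = t then some c
      else if fb.isNone &&
          (PySem.Chars.isIn t (pvNorm c.toList) || PySem.Chars.isIn (pvNorm c.toList) t) then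
        pvLoop t rest (some c)
      else pvLoop t rest fb := rfl

theorem pvLoop_eq (t : List Char) (cs : List String) (fb : Option String) :
    pvLoop t cs fb =
      match (pvPairs cs).find? (fun pr => pr.1 == t) with
      | some pr => some pr.2
      | none =>
        fb.or (((pvPairs cs).find?
          (fun pr => PySem.Chars.isIn t pr.1 || PySem.Chars.isIn pr.1 t)).map Prod.snd) := by
  induction cs generalizing fb with
  | nil => simp [pvLoop, pvPairs]
  | cons c rest ih =>
    rw [pvPairs_cons, pvLoop_cons]
    by_cases h0 : pvNorm c.toList = []
    · rw [if_pos h0, if_pos h0]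
      exact ih fb
    · rw [if_neg h0, if_neg h0]
      by_cases he : pvNorm c.toList = t
      · rw [if_pos he, List.find?_cons_of_pos (by simp [he])]
      · rw [if_neg he, List.find?_cons_of_neg (by simp [he])]
        by_cases hfb : fb = none
        · subst hfb
          by_cases hs : (PySem.Chars.isIn t (pvNorm c.toList)
              || PySem.Chars.isIn (pvNorm c.toList) t) = true
          · rw [if_pos (by simp [hs]), ih]
            cases hE : (pvPairs rest).find? (fun pr => pr.1 == t) with
            | some pr => simp
            | none =>
              rw [List.find?_cons_of_pos (by simpa using hs)]
              simp
          · rw [if_neg (by simp; simpa using hs), ih]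
            cases hE : (pvPairs rest).find? (fun pr => pr.1 == t) with
            | some pr => simp
            | none =>
              rw [List.find?_cons_of_neg (by simpa using hs)]
        · rw [if_neg (by simp [Option.isNone_iff_eq_none, hfb]), ih]
          cases hE : (pvPairs rest).find? (fun pr => pr.1 == t) with
          | some pr => simp
          | none =>
            obtain ⟨v, rfl⟩ := Option.ne_none_iff_exists'.mp hfb
            simp [Option.or]

-- ===== VERDICT (by name: the statement is the Claim_ definition above) =====
theorem match_player_name_py_spec : Claim_equal_match_player_name_py := by
  intro player_name candidate_names _
  unfold Spec_match_player_name_py match_player_name_py match_player_name_py_alt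
  by_cases ht : pvNorm player_name.toList = []
  · simp [ht]
  · simp only [if_neg ht]
    rw [pvBuild_eq candidate_names [], pvLoop_eq]
    simp only [List.nil_append]
    cases hE : (pvPairs candidate_names).find? (fun pr => pr.1 == pvNorm player_name.toList) with
    | some pr => simp
    | none =>
      cases hS : (pvPairs candidate_names).find?
          (fun pr => PySem.Chars.isIn (pvNorm player_name.toList) pr.1
            || PySem.Chars.isIn pr.1 (pvNorm player_name.toList)) with
      | some pr => simp
      | none => simp
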